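-- pv_equiv track=rewrite | github.com/soxballs/gcpwn | gcpwn/modules/opengraph/utilities/helpers/iam_bindings_shared_helpers.py | _permission_resource_types
-- ===== SOURCE A (Python) =====
-- _PERMISSION_RESOURCE_TYPE_MAP: tuple[tuple[str, tuple[str, ...]], ...] = (
--     ("resourcemanager.organizations.", ("cloudresourcemanager.googleapis.com/Organization",)),
--     ("resourcemanager.folders.", ("cloudresourcemanager.googleapis.com/Folder",)),
--     ("resourcemanager.projects.", ("cloudresourcemanager.googleapis.com/Project",)),
--     ("compute.instances.", ("compute.googleapis.com/Instance",)),
--     ("storage.buckets.", ("storage.googleapis.com/Bucket",)),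
--     ("storage.objects.", ("storage.googleapis.com/Object",)),
--     ("cloudfunctions.functions.", ("cloudfunctions.googleapis.com/CloudFunction",)),
--     ("iam.serviceAccounts.", ("iam.googleapis.com/ServiceAccount",)),
--     ("iam.serviceAccountKeys.", ("iam.googleapis.com/ServiceAccountKey",)),
--     ("iam.roles.", ("iam.googleapis.com/Role",)),
--     ("secretmanager.secrets.", ("secretmanager.googleapis.com/Secret",)),
--     ("secretmanager.versions.", ("secretmanager.googleapis.com/SecretVersion",)),
--     ("cloudkms.keyRings.", ("cloudkms.googleapis.com/KeyRing",)),
--     ("cloudkms.cryptoKeys.", ("cloudkms.googleapis.com/CryptoKey",)),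
--     ("run.services.", ("run.googleapis.com/Service",)),
--     ("run.jobs.", ("run.googleapis.com/Job",)),
--     ("artifactregistry.repositories.", ("artifactregistry.googleapis.com/Repository",)),
--     ("pubsub.topics.", ("pubsub.googleapis.com/Topic",)),
--     ("pubsub.subscriptions.", ("pubsub.googleapis.com/Subscription",)),
--     ("pubsub.snapshots.", ("pubsub.googleapis.com/Snapshot",)),
--     ("pubsub.schemas.", ("pubsub.googleapis.com/Schema",)),
--     ("servicedirectory.namespaces.", ("servicedirectory.googleapis.com/Namespace",)),
--     ("servicedirectory.services.", ("servicedirectory.googleapis.com/Service",)),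
--     ("spanner.instances.", ("spanner.googleapis.com/Instance",)),
--     ("spanner.databases.", ("spanner.googleapis.com/Database",)),
--     ("cloudtasks.queues.", ("cloudtasks.googleapis.com/Queue",)),
-- )
--
-- def _permission_resource_types(permission: str) -> set[str]:
--     token = str(permission or "").strip()
--     if not token:
--         return set()
--     for prefix, resource_types in _PERMISSION_RESOURCE_TYPE_MAP:
--         if token.startswith(prefix):
--             return set(resource_types or ())
--     return set()
-- ===== SOURCE B (Python) =====
-- _RESOURCE_TYPES_BY_SERVICE = {
--     "resourcemanager": {
--         "organizations": ("cloudresourcemanager.googleapis.com/Organization",),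
--         "folders": ("cloudresourcemanager.googleapis.com/Folder",),
--         "projects": ("cloudresourcemanager.googleapis.com/Project",),
--     },
--     "compute": {"instances": ("compute.googleapis.com/Instance",)},
--     "storage": {
--         "buckets": ("storage.googleapis.com/Bucket",),
--         "objects": ("storage.googleapis.com/Object",),
--     },
--     "cloudfunctions": {"functions": ("cloudfunctions.googleapis.com/CloudFunction",)},
--     "iam": {
--         "serviceAccounts": ("iam.googleapis.com/ServiceAccount",),
--         "serviceAccountKeys": ("iam.googleapis.com/ServiceAccountKey",),
--         "roles": ("iam.googleapis.com/Role",),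
--     },
--     "secretmanager": {
--         "secrets": ("secretmanager.googleapis.com/Secret",),
--         "versions": ("secretmanager.googleapis.com/SecretVersion",),
--     },
--     "cloudkms": {
--         "keyRings": ("cloudkms.googleapis.com/KeyRing",),
--         "cryptoKeys": ("cloudkms.googleapis.com/CryptoKey",),
--     },
--     "run": {
--         "services": ("run.googleapis.com/Service",),
--         "jobs": ("run.googleapis.com/Job",),
--     },
--     "artifactregistry": {"repositories": ("artifactregistry.googleapis.com/Repository",)},
--     "pubsub": {
--         "topics": ("pubsub.googleapis.com/Topic",),
--         "subscriptions": ("pubsub.googleapis.com/Subscription",),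
--         "snapshots": ("pubsub.googleapis.com/Snapshot",),
--         "schemas": ("pubsub.googleapis.com/Schema",),
--     },
--     "servicedirectory": {
--         "namespaces": ("servicedirectory.googleapis.com/Namespace",),
--         "services": ("servicedirectory.googleapis.com/Service",),
--     },
--     "spanner": {
--         "instances": ("spanner.googleapis.com/Instance",),
--         "databases": ("spanner.googleapis.com/Database",),
--     },
--     "cloudtasks": {"queues": ("cloudtasks.googleapis.com/Queue",)},
-- }
--
--
-- def _permission_resource_types(permission: str) -> set[str]:
--     parts = (permission or "").strip().split(".")
--     if len(parts) < 3:
--         return set()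
--     return set(_RESOURCE_TYPES_BY_SERVICE.get(parts[0], {}).get(parts[1], ()))
-- ===== Notes on version B (the rewrite author's own statement) =====
-- stated objective: idiomatic
-- what changed: Replaces the linear startswith scan over 26 dotted prefixes by splitting the token at dots and doing two hash lookups in a nested dict keyed by service then resource segment.
import Mathlib
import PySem

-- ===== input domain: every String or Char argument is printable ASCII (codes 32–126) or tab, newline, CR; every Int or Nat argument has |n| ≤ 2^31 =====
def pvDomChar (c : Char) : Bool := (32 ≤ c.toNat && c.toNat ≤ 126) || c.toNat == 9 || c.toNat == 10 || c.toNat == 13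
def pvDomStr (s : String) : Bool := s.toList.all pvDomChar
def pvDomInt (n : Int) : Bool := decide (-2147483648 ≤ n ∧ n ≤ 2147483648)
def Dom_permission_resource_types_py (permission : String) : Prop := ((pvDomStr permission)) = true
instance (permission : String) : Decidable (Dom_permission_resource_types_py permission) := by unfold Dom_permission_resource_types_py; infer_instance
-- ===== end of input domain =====

-- ===== PORT A =====
-- B replaces A's linear startswith scan over 26 dotted prefixes by splitting the token at
-- dots and doing two lookups in a nested dict keyed by service then resource segment (idiomatic).
def pvMapA : List (String × List String) := [
  ("resourcemanager.organizations.", ["cloudresourcemanager.googleapis.com/Organization"]),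
  ("resourcemanager.folders.", ["cloudresourcemanager.googleapis.com/Folder"]),
  ("resourcemanager.projects.", ["cloudresourcemanager.googleapis.com/Project"]),
  ("compute.instances.", ["compute.googleapis.com/Instance"]),
  ("storage.buckets.", ["storage.googleapis.com/Bucket"]),
  ("storage.objects.", ["storage.googleapis.com/Object"]),
  ("cloudfunctions.functions.", ["cloudfunctions.googleapis.com/CloudFunction"]),
  ("iam.serviceAccounts.", ["iam.googleapis.com/ServiceAccount"]),
  ("iam.serviceAccountKeys.", ["iam.googleapis.com/ServiceAccountKey"]),
  ("iam.roles.", ["iam.googleapis.com/Role"]),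
  ("secretmanager.secrets.", ["secretmanager.googleapis.com/Secret"]),
  ("secretmanager.versions.", ["secretmanager.googleapis.com/SecretVersion"]),
  ("cloudkms.keyRings.", ["cloudkms.googleapis.com/KeyRing"]),
  ("cloudkms.cryptoKeys.", ["cloudkms.googleapis.com/CryptoKey"]),
  ("run.services.", ["run.googleapis.com/Service"]),
  ("run.jobs.", ["run.googleapis.com/Job"]),
  ("artifactregistry.repositories.", ["artifactregistry.googleapis.com/Repository"]),
  ("pubsub.topics.", ["pubsub.googleapis.com/Topic"]),
  ("pubsub.subscriptions.", ["pubsub.googleapis.com/Subscription"]),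
  ("pubsub.snapshots.", ["pubsub.googleapis.com/Snapshot"]),
  ("pubsub.schemas.", ["pubsub.googleapis.com/Schema"]),
  ("servicedirectory.namespaces.", ["servicedirectory.googleapis.com/Namespace"]),
  ("servicedirectory.services.", ["servicedirectory.googleapis.com/Service"]),
  ("spanner.instances.", ["spanner.googleapis.com/Instance"]),
  ("spanner.databases.", ["spanner.googleapis.com/Database"]),
  ("cloudtasks.queues.", ["cloudtasks.googleapis.com/Queue"]),
]

-- the for-loop of A: first prefix that token startswith wins; its (singleton, nonempty)
-- resource_types tuple becomes the returned set; no match -> empty set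
def pvScanA (token : List Char) : List (String × List String) → List String
  | [] => []
  | (p, ts) :: rest =>
    if PySem.Chars.startswith token p.toList then ts else pvScanA token rest

def permission_resource_types_py (permission : String) : List String :=
  -- str(permission or "") on a str argument: "" stays "", any other string is itself
  let token := PySem.Chars.strip (if permission.toList = [] then [] else permission.toList)
  if token = [] then [] else pvScanA token pvMapA

-- ===== PORT B =====
-- the nested dict _RESOURCE_TYPES_BY_SERVICE: service segment -> resource segment -> types
def pvByServiceB : PySem.Dict (List Char) (PySem.Dict (List Char) (List String)) := PySem.Dict.mk [
  ("resourcemanager".toList, PySem.Dict.mk [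
    ("organizations".toList, ["cloudresourcemanager.googleapis.com/Organization"]),
    ("folders".toList, ["cloudresourcemanager.googleapis.com/Folder"]),
    ("projects".toList, ["cloudresourcemanager.googleapis.com/Project"])]),
  ("compute".toList, PySem.Dict.mk [("instances".toList, ["compute.googleapis.com/Instance"])]),
  ("storage".toList, PySem.Dict.mk [
    ("buckets".toList, ["storage.googleapis.com/Bucket"]),
    ("objects".toList, ["storage.googleapis.com/Object"])]),
  ("cloudfunctions".toList, PySem.Dict.mk [("functions".toList, ["cloudfunctions.googleapis.com/CloudFunction"])]),
  ("iam".toList, PySem.Dict.mk [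
    ("serviceAccounts".toList, ["iam.googleapis.com/ServiceAccount"]),
    ("serviceAccountKeys".toList, ["iam.googleapis.com/ServiceAccountKey"]),
    ("roles".toList, ["iam.googleapis.com/Role"])]),
  ("secretmanager".toList, PySem.Dict.mk [
    ("secrets".toList, ["secretmanager.googleapis.com/Secret"]),
    ("versions".toList, ["secretmanager.googleapis.com/SecretVersion"])]),
  ("cloudkms".toList, PySem.Dict.mk [
    ("keyRings".toList, ["cloudkms.googleapis.com/KeyRing"]),
    ("cryptoKeys".toList, ["cloudkms.googleapis.com/CryptoKey"])]),
  ("run".toList, PySem.Dict.mk [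
    ("services".toList, ["run.googleapis.com/Service"]),
    ("jobs".toList, ["run.googleapis.com/Job"])]),
  ("artifactregistry".toList, PySem.Dict.mk [("repositories".toList, ["artifactregistry.googleapis.com/Repository"])]),
  ("pubsub".toList, PySem.Dict.mk [
    ("topics".toList, ["pubsub.googleapis.com/Topic"]),
    ("subscriptions".toList, ["pubsub.googleapis.com/Subscription"]),
    ("snapshots".toList, ["pubsub.googleapis.com/Snapshot"]),
    ("schemas".toList, ["pubsub.googleapis.com/Schema"])]),
  ("servicedirectory".toList, PySem.Dict.mk [
    ("namespaces".toList, ["servicedirectory.googleapis.com/Namespace"]),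
    ("services".toList, ["servicedirectory.googleapis.com/Service"])]),
  ("spanner".toList, PySem.Dict.mk [
    ("instances".toList, ["spanner.googleapis.com/Instance"]),
    ("databases".toList, ["spanner.googleapis.com/Database"])]),
  ("cloudtasks".toList, PySem.Dict.mk [("queues".toList, ["cloudtasks.googleapis.com/Queue"])]),
]

def permission_resource_types_py_alt (permission : String) : List String :=
  let parts := PySem.Chars.splitOn
    (PySem.Chars.strip (if permission.toList = [] then [] else permission.toList)) ['.']
  if parts.length < 3 then []
  else (pvByServiceB.getD (parts.getD 0 []) (PySem.Dict.mk [])).getD (parts.getD 1 []) []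

-- ===== PRECONDITION & SPEC =====
def Spec_permission_resource_types_py (permission : String) (out : List String) : Prop := out = permission_resource_types_py_alt permission
instance (permission : String) (out : List String) : Decidable (Spec_permission_resource_types_py permission out) := by unfold Spec_permission_resource_types_py; infer_instance

-- ===== CLAIM (what is proved, stated in full; the proofs are below) =====
def Claim_equal_permission_resource_types_py : Prop := ∀ (permission : String), Dom_permission_resource_types_py permission → Spec_permission_resource_types_py permission (permission_resource_types_py permission)

-- ===== LEMMAS AND PROOFS =====

def msp : List Char → List (List Char)
  | [] => [[]]
  | c :: r =>
    if c = '.' then [] :: msp r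
    else match msp r with
         | [] => [[c]]
         | s :: ss => (c :: s) :: ss

theorem msp_ne_nil (t : List Char) : msp t ≠ [] := by
  cases t with
  | nil => simp [msp]
  | cons c r =>
    simp only [msp]
    split
    · simp
    · split <;> simp

theorem splitOn_go_eq (fuel : Nat) : ∀ (l cur : List Char) (acc : List (List Char)),
    l.length < fuel →
    PySem.Chars.splitOn.go ['.'] fuel l cur acc =
      acc.reverse ++ (match msp l with
        | [] => [cur.reverse]
        | s :: ss => (cur.reverse ++ s) :: ss) := by
  induction fuel with
  | zero => intro l cur acc h; omega
  | succ n ih =>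
    intro l cur acc h
    cases l with
    | nil => simp [PySem.Chars.splitOn.go, msp]
    | cons c rest =>
      rw [PySem.Chars.splitOn.go]
      by_cases hc : c = '.'
      · subst hc
        simp only [List.isPrefixOf, BEq.rfl, Bool.true_and, if_true,
          List.length_singleton, List.drop_one, List.tail_cons]
        rw [ih rest [] _ (by simpa using Nat.lt_of_succ_lt_succ h)]
        have hr := msp_ne_nil rest
        cases hmr : msp rest with
        | nil => exact absurd hmr hr
        | cons s ss => simp [msp, hmr]
      · have hpre : List.isPrefixOf ['.'] (c :: rest) = false := by
          simp [List.isPrefixOf]; exact fun hh => hc (by simpa using hh.symm)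
        rw [hpre]
        simp only [if_false, Bool.false_eq_true]
        rw [ih rest (c :: cur) acc (by simpa using Nat.lt_of_succ_lt_succ h)]
        have hr := msp_ne_nil rest
        cases hmr : msp rest with
        | nil => exact absurd hmr hr
        | cons s ss => simp [msp, hmr, hc]

theorem splitOn_eq_msp (t : List Char) : PySem.Chars.splitOn t ['.'] = msp t := by
  rw [PySem.Chars.splitOn, splitOn_go_eq _ _ _ _ (by omega)]
  cases h : msp t with
  | nil => exact absurd h (msp_ne_nil t)
  | cons s ss => simp

theorem msp_append_dot (a : List Char) : ∀ t, ('.' : Char) ∉ a →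
    msp (a ++ '.' :: t) = a :: msp t := by
  induction a with
  | nil => intro t _; simp [msp]
  | cons c a' ih =>
    intro t h
    have hc : c ≠ '.' := fun hh => h (by simp [hh])
    have := ih t (fun hh => h (by simp [hh]))
    simp only [List.cons_append, msp, if_neg hc, this]

theorem msp_eq_single : ∀ t x, msp t = [x] → t = x := by
  intro t
  induction t with
  | nil => intro x h; simp [msp] at h; exact h.symm
  | cons c r ih =>
    intro x h
    by_cases hc : c = '.'
    · subst hc; simp only [msp, if_true] at h
      obtain ⟨h1, h2⟩ := List.cons.injEq .. ▸ h
      exact absurd h2 (msp_ne_nil r)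
    · simp only [msp, if_neg hc] at h
      cases hmr : msp r with
      | nil => exact absurd hmr (msp_ne_nil r)
      | cons s ss =>
        rw [hmr] at h
        obtain ⟨h1, h2⟩ := List.cons.injEq .. ▸ h
        have : r = s := ih s (by rw [hmr, h2])
        simp [← h1, this]

theorem msp_cons_cons : ∀ (t p q : List Char) (r : List (List Char)),
    msp t = p :: q :: r →
    ('.' : Char) ∉ p ∧ ∃ t', t = p ++ '.' :: t' ∧ msp t' = q :: r := by
  intro t
  induction t with
  | nil => intro p q r h; simp [msp] at h
  | cons c rest ih =>
    intro p q r h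
    by_cases hc : c = '.'
    · subst hc
      simp only [msp, if_true] at h
      obtain ⟨h1, h2⟩ := List.cons.injEq .. ▸ h
      exact ⟨by simp [← h1], rest, by simp [← h1], h2⟩
    · simp only [msp, if_neg hc] at h
      cases hmr : msp rest with
      | nil => exact absurd hmr (msp_ne_nil rest)
      | cons s ss =>
        rw [hmr] at h
        obtain ⟨h1, h2⟩ := List.cons.injEq .. ▸ h
        subst h2
        obtain ⟨hnd, t', ht', hm'⟩ := ih s q r hmr
        refine ⟨?_, t', by simp [← h1, ht'], hm'⟩
        intro hmem
        rw [← h1] at hmem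
        rcases List.mem_cons.mp hmem with h' | h'
        · exact hc h'.symm
        · exact hnd h'

def pvKeyOk (p : List Char) : Bool :=
  match msp p with
  | [_, _, c] => c.isEmpty
  | _ => false

theorem keyShape (p : List Char) (h : pvKeyOk p = true) :
    ∃ a b, p = a ++ '.' :: (b ++ ['.']) ∧ ('.' : Char) ∉ a ∧ ('.' : Char) ∉ b ∧
      msp p = [a, b, []] := by
  unfold pvKeyOk at h
  cases hm : msp p with
  | nil => exact absurd hm (msp_ne_nil p)
  | cons a rest =>
    cases rest with
    | nil => rw [hm] at h; simp at h
    | cons b rest2 =>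
      cases rest2 with
      | nil => rw [hm] at h; simp at h
      | cons c rest3 =>
        cases rest3 with
        | cons d r4 => rw [hm] at h; simp at h
        | nil =>
          rw [hm] at h; simp only [List.isEmpty_iff] at h
          subst h
          obtain ⟨ha, t1, ht1, hm1⟩ := msp_cons_cons p a b [[]] hm
          obtain ⟨hb, t2, ht2, hm2⟩ := msp_cons_cons t1 b [] [] hm1
          have : t2 = [] := msp_eq_single t2 [] hm2
          subst this
          exact ⟨a, b, by simp [ht1, ht2], ha, hb, by simpa using hm⟩

theorem dotkey_inj : ∀ (u a x y : List Char), ('.' : Char) ∉ u → ('.' : Char) ∉ a →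
    (u ++ '.' :: x = a ++ '.' :: y ↔ u = a ∧ x = y) := by
  intro u
  induction u with
  | nil =>
    intro a x y _ ha
    cases a with
    | nil => simp
    | cons d a' =>
      constructor
      · intro h
        simp only [List.nil_append, List.cons_append, List.cons.injEq] at h
        exact absurd (by simp [← h.1]) ha
      · rintro ⟨h, _⟩; simp at h
  | cons c u' ih =>
    intro a x y hu ha
    cases a with
    | nil =>
      constructor
      · intro h
        simp only [List.cons_append, List.nil_append, List.cons.injEq] at h
        exact absurd (by simp [h.1]) hu
      · rintro ⟨h, _⟩; simp at h
    | cons d a' =>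
      have := ih a' x y (fun hh => hu (by simp [hh])) (fun hh => ha (by simp [hh]))
      simp only [List.cons_append, List.cons.injEq, this]
      constructor
      · rintro ⟨h1, h2, h3⟩; exact ⟨⟨h1, h2⟩, h3⟩
      · rintro ⟨⟨h1, h2⟩, h3⟩; exact ⟨h1, h2, h3⟩

theorem sw_iff (t p a b u v : List Char) (r : List (List Char))
    (hp : msp p = [a, b, []]) (hpe : p = a ++ '.' :: (b ++ ['.']))
    (hpa : ('.' : Char) ∉ a) (hpb : ('.' : Char) ∉ b)
    (ht : msp t = u :: v :: r) (hr : r ≠ []) :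
    (PySem.Chars.startswith t p = true ↔ (u = a ∧ v = b)) := by
  rw [PySem.Chars.startswith_iff]
  constructor
  · rintro ⟨s, hs⟩
    have : t = a ++ '.' :: (b ++ '.' :: s) := by
      rw [← hs, hpe]; simp
    rw [this, msp_append_dot a _ hpa, msp_append_dot b _ hpb] at ht
    obtain ⟨h1, h2⟩ := List.cons.injEq .. ▸ ht
    obtain ⟨h3, _⟩ := List.cons.injEq .. ▸ h2
    exact ⟨h1.symm, h3.symm⟩
  · rintro ⟨hua, hvb⟩
    subst hua; subst hvb
    obtain ⟨_, t1, ht1, hm1⟩ := msp_cons_cons t u v r ht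
    cases r with
    | nil => exact absurd rfl hr
    | cons q r2 =>
      obtain ⟨_, t2, ht2, _⟩ := msp_cons_cons t1 v q r2 hm1
      refine ⟨t2, ?_⟩
      rw [hpe, ht1, ht2]; simp

theorem scanEq (key_u key_v : List Char) :
    ∀ (m : List (String × List String)),
    (∀ e ∈ m, pvKeyOk e.1.toList = true) →
    ∀ (t : List Char) (r : List (List Char)), msp t = key_u :: key_v :: r → r ≠ [] →
    pvScanA t m =
      (((m.map (fun e => (e.1.toList, e.2))).find?
          (fun e => e.1 == (key_u ++ '.' :: (key_v ++ ['.'])))).map (·.2)).getD [] := by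
  intro m
  induction m with
  | nil => intro _ t r _ _; simp [pvScanA]
  | cons e m' ih =>
    intro hok t r ht hr
    obtain ⟨p, ts⟩ := e
    obtain ⟨a, b, hpe, hpa, hpb, hp⟩ := keyShape p.toList (hok (p, ts) (by simp))
    have hdotu : ('.' : Char) ∉ key_u := (msp_cons_cons t key_u key_v r ht).1
    have hsw := sw_iff t p.toList a b key_u key_v r hp hpe hpa hpb ht hr
    have hkey : ((key_u ++ '.' :: (key_v ++ ['.'])) == p.toList) = true ↔ (key_u = a ∧ key_v = b) := by
      rw [beq_iff_eq, hpe, dotkey_inj key_u a _ _ hdotu hpa, List.append_left_inj]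
    by_cases hcase : key_u = a ∧ key_v = b
    · simp only [pvScanA, hsw.mpr hcase, if_true, List.map_cons, List.find?_cons,
        BEq.comm, hkey.mpr hcase]
      simp
    · have h1 : PySem.Chars.startswith t p.toList = false := by
        rw [← Bool.not_eq_true, hsw]; exact hcase
      have h2 : (p.toList == (key_u ++ '.' :: (key_v ++ ['.']))) = false := by
        rw [← Bool.not_eq_true, BEq.comm, hkey]; exact hcase
      simp only [pvScanA, h1, Bool.false_eq_true, if_false, List.map_cons, List.find?_cons, h2]
      exact ih (fun e he => hok e (by simp [he])) t r ht hr

theorem scanNil :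
    ∀ (m : List (String × List String)),
    (∀ e ∈ m, pvKeyOk e.1.toList = true) →
    ∀ (t : List Char), (msp t).length < 3 →
    pvScanA t m = [] := by
  intro m
  induction m with
  | nil => intro _ t _; simp [pvScanA]
  | cons e m' ih =>
    intro hok t hlen
    obtain ⟨p, ts⟩ := e
    obtain ⟨a, b, hpe, hpa, hpb, _⟩ := keyShape p.toList (hok (p, ts) (by simp))
    have h1 : PySem.Chars.startswith t p.toList = false := by
      rw [← Bool.not_eq_true, PySem.Chars.startswith_iff]
      rintro ⟨s, hs⟩
      have : t = a ++ '.' :: (b ++ '.' :: s) := by rw [← hs, hpe]; simp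
      rw [this, msp_append_dot a _ hpa, msp_append_dot b _ hpb] at hlen
      have := msp_ne_nil s
      cases hms : msp s with
      | nil => exact this hms
      | cons x xs => rw [hms] at hlen; simp at hlen; omega
    simp only [pvScanA, h1, Bool.false_eq_true, if_false]
    exact ih (fun e he => hok e (by simp [he])) t hlen

theorem mapA_ok : ∀ e ∈ pvMapA, pvKeyOk e.1.toList = true := by decide

-- ========= bridge from the flat prefix table to the nested dict =========

-- a lookup in a literal Dict is a find? over its item list
theorem dict_get?_mk {ν : Type} : ∀ (l : List (List Char × ν)) (k : List Char),
    (PySem.Dict.mk l).get? k = (l.find? (fun e => e.1 == k)).map (·.2) := by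
  intro l
  induction l with
  | nil => intro k; simp [PySem.Dict.get?]
  | cons e rest ih =>
    intro k
    obtain ⟨a, v⟩ := e
    rw [PySem.Dict.get?_mk_cons, List.find?_cons]
    by_cases h : (a == k) = true
    · simp [h]
    · simp only [Bool.not_eq_true] at h
      simp [h, ih k]

theorem dict_getD_mk {ν : Type} (l : List (List Char × ν)) (k : List Char) (d : ν) :
    (PySem.Dict.mk l).getD k d = ((l.find? (fun e => e.1 == k)).map (·.2)).getD d := by
  rw [PySem.Dict.getD_eq_get?_getD, dict_get?_mk]

-- grouped view of the flat table: each group = (service, [(resource, types)])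
def pvFlat (gs : List (List Char × List (List Char × List String))) :
    List (List Char × List String) :=
  gs.flatMap (fun g => g.2.map (fun e => (g.1 ++ '.' :: (e.1 ++ ['.']), e.2)))

theorem find?_inner (u v s : List Char) (hu : ('.' : Char) ∉ u) (hs : ('.' : Char) ∉ s) :
    ∀ (inner : List (List Char × List String)),
    ((inner.map (fun e => (s ++ '.' :: (e.1 ++ ['.']), e.2))).find?
        (fun e => e.1 == (u ++ '.' :: (v ++ ['.'])))).map (·.2) =
      if u = s then (inner.find? (fun e => e.1 == v)).map (·.2) else none := by
  intro inner
  induction inner with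
  | nil => simp
  | cons e rest ih =>
    obtain ⟨a, ts⟩ := e
    simp only [List.map_cons, List.find?_cons]
    have hiff : ((s ++ '.' :: (a ++ ['.'])) == (u ++ '.' :: (v ++ ['.']))) = true ↔ (s = u ∧ a = v) := by
      rw [beq_iff_eq, dotkey_inj s u _ _ hs hu, List.append_left_inj]
    by_cases hcase : s = u ∧ a = v
    · obtain ⟨hc1, hc2⟩ := hcase
      subst hc1; subst hc2
      simp
    · have h1 : ((s ++ '.' :: (a ++ ['.'])) == (u ++ '.' :: (v ++ ['.']))) = false := by
        rw [← Bool.not_eq_true, hiff]; exact hcase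
      rw [h1]
      rw [ih]
      by_cases hus : u = s
      · rw [if_pos hus, if_pos hus]
        have hav : (a == v) = false := by
          rw [← Bool.not_eq_true, beq_iff_eq]
          exact fun hh => hcase ⟨hus.symm, hh⟩
        simp [hav]
      · rw [if_neg hus, if_neg hus]

theorem flat_none (u v : List Char) (hu : ('.' : Char) ∉ u) :
    ∀ (gs : List (List Char × List (List Char × List String))),
    (∀ g ∈ gs, ('.' : Char) ∉ g.1) → (∀ g ∈ gs, g.1 ≠ u) →
    (pvFlat gs).find? (fun e => e.1 == (u ++ '.' :: (v ++ ['.']))) = none := by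
  intro gs
  induction gs with
  | nil => intro _ _; simp [pvFlat]
  | cons g rest ih =>
    intro hdot hne
    obtain ⟨s, inner⟩ := g
    have hs : ('.' : Char) ∉ s := hdot (s, inner) (by simp)
    have hsu : u ≠ s := fun hh => hne (s, inner) (by simp) hh.symm
    have hmapped := find?_inner u v s hu hs inner
    rw [if_neg hsu] at hmapped
    simp only [Option.map_eq_none_iff] at hmapped
    simp only [pvFlat, List.flatMap_cons, List.find?_append, hmapped, Option.none_or]
    exact ih (fun g hg => hdot g (List.mem_cons_of_mem _ hg))
      (fun g hg => hne g (List.mem_cons_of_mem _ hg))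

theorem groupedEq (u v : List Char) (hu : ('.' : Char) ∉ u) :
    ∀ (gs : List (List Char × List (List Char × List String))),
    (∀ g ∈ gs, ('.' : Char) ∉ g.1) → gs.Pairwise (fun a b => a.1 ≠ b.1) →
    (((pvFlat gs).find? (fun e => e.1 == (u ++ '.' :: (v ++ ['.'])))).map (·.2)).getD [] =
      ((PySem.Dict.mk (gs.map (fun g => (g.1, PySem.Dict.mk g.2)))).getD u
        (PySem.Dict.mk [])).getD v [] := by
  intro gs
  induction gs with
  | nil =>
    intro _ _
    simp [pvFlat, PySem.Dict.getD_eq_get?_getD, dict_get?_mk]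
  | cons g rest ih =>
    intro hdot hpw
    obtain ⟨s, inner⟩ := g
    have hs : ('.' : Char) ∉ s := hdot (s, inner) (by simp)
    have hrestdot := fun g hg => hdot g (List.mem_cons_of_mem _ hg)
    have hrestpw := (List.pairwise_cons.mp hpw).2
    have hrestne := (List.pairwise_cons.mp hpw).1
    simp only [pvFlat, List.flatMap_cons, List.find?_append, List.map_cons]
    rw [dict_getD_mk _ u _, List.find?_cons]
    have hmapped := find?_inner u v s hu hs inner
    by_cases hus : u = s
    · have hbeq : (s == u) = true := by rw [beq_iff_eq]; exact hus.symm
      rw [if_pos hus] at hmapped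
      simp only [hbeq, Option.map_some, Option.getD_some]
      rw [dict_getD_mk _ v _]
      cases hfound : (inner.find? (fun e => e.1 == v)) with
      | some e =>
        rw [hfound] at hmapped
        cases hmf : ((inner.map (fun e => (s ++ '.' :: (e.1 ++ ['.']), e.2))).find?
            (fun e => e.1 == (u ++ '.' :: (v ++ ['.'])))) with
        | none => rw [hmf] at hmapped; simp at hmapped
        | some f =>
          rw [hmf] at hmapped
          simp only [Option.map_some, Option.some.injEq] at hmapped
          simp [hmapped]
      | none =>
        rw [hfound] at hmapped
        simp only [Option.map_none, Option.map_eq_none_iff] at hmapped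
        have hnone := flat_none u v hu rest hrestdot
          (fun g hg hh => hrestne g hg ((hh.trans hus).symm))
        rw [hmapped]
        simp only [Option.none_or]
        rw [show (List.flatMap (fun g => List.map (fun e => (g.1 ++ '.' :: (e.1 ++ ['.']), e.2)) g.2) rest) = pvFlat rest from rfl, hnone]
    · have hbeq : (s == u) = false := by
        rw [← Bool.not_eq_true, beq_iff_eq]; exact fun hh => hus hh.symm
      rw [if_neg hus] at hmapped
      simp only [Option.map_eq_none_iff] at hmapped
      rw [hmapped]
      simp only [hbeq, Option.none_or]
      rw [show (List.flatMap (fun g => List.map (fun e => (g.1 ++ '.' :: (e.1 ++ ['.']), e.2)) g.2) rest) = pvFlat rest from rfl, ← dict_getD_mk _ u _]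
      exact ih hrestdot hrestpw

def pvGroups : List (List Char × List (List Char × List String)) := [
  ("resourcemanager".toList, [("organizations".toList, ["cloudresourcemanager.googleapis.com/Organization"]), ("folders".toList, ["cloudresourcemanager.googleapis.com/Folder"]), ("projects".toList, ["cloudresourcemanager.googleapis.com/Project"])]),
  ("compute".toList, [("instances".toList, ["compute.googleapis.com/Instance"])]),
  ("storage".toList, [("buckets".toList, ["storage.googleapis.com/Bucket"]), ("objects".toList, ["storage.googleapis.com/Object"])]),
  ("cloudfunctions".toList, [("functions".toList, ["cloudfunctions.googleapis.com/CloudFunction"])]),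
  ("iam".toList, [("serviceAccounts".toList, ["iam.googleapis.com/ServiceAccount"]), ("serviceAccountKeys".toList, ["iam.googleapis.com/ServiceAccountKey"]), ("roles".toList, ["iam.googleapis.com/Role"])]),
  ("secretmanager".toList, [("secrets".toList, ["secretmanager.googleapis.com/Secret"]), ("versions".toList, ["secretmanager.googleapis.com/SecretVersion"])]),
  ("cloudkms".toList, [("keyRings".toList, ["cloudkms.googleapis.com/KeyRing"]), ("cryptoKeys".toList, ["cloudkms.googleapis.com/CryptoKey"])]),
  ("run".toList, [("services".toList, ["run.googleapis.com/Service"]), ("jobs".toList, ["run.googleapis.com/Job"])]),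
  ("artifactregistry".toList, [("repositories".toList, ["artifactregistry.googleapis.com/Repository"])]),
  ("pubsub".toList, [("topics".toList, ["pubsub.googleapis.com/Topic"]), ("subscriptions".toList, ["pubsub.googleapis.com/Subscription"]), ("snapshots".toList, ["pubsub.googleapis.com/Snapshot"]), ("schemas".toList, ["pubsub.googleapis.com/Schema"])]),
  ("servicedirectory".toList, [("namespaces".toList, ["servicedirectory.googleapis.com/Namespace"]), ("services".toList, ["servicedirectory.googleapis.com/Service"])]),
  ("spanner".toList, [("instances".toList, ["spanner.googleapis.com/Instance"]), ("databases".toList, ["spanner.googleapis.com/Database"])]),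
  ("cloudtasks".toList, [("queues".toList, ["cloudtasks.googleapis.com/Queue"])])]

theorem flatA : pvMapA.map (fun e => (e.1.toList, e.2)) = pvFlat pvGroups := by decide

theorem byServiceB_eq : pvByServiceB = PySem.Dict.mk (pvGroups.map (fun g => (g.1, PySem.Dict.mk g.2))) := by decide

theorem groups_dot : ∀ g ∈ pvGroups, ('.' : Char) ∉ g.1 := by decide

theorem groups_pw : pvGroups.Pairwise (fun a b => a.1 ≠ b.1) := by decide

-- ===== VERDICT =====
theorem permission_resource_types_py_spec : Claim_equal_permission_resource_types_py := by
  intro permission _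
  unfold Spec_permission_resource_types_py permission_resource_types_py permission_resource_types_py_alt
  rw [splitOn_eq_msp]
  by_cases h0 : PySem.Chars.strip (if permission.toList = [] then [] else permission.toList) = []
  · rw [if_pos h0, h0]
    simp [msp]
  · rw [if_neg h0]
    by_cases hlen : (msp (PySem.Chars.strip (if permission.toList = [] then [] else permission.toList))).length < 3
    · rw [if_pos hlen, scanNil pvMapA mapA_ok _ hlen]
    · rw [if_neg hlen]
      cases hm : msp (PySem.Chars.strip (if permission.toList = [] then [] else permission.toList)) with
      | nil => exact absurd hm (msp_ne_nil _)
      | cons u rest =>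
        cases rest with
        | nil => rw [hm] at hlen; simp at hlen
        | cons v r =>
          have hr : r ≠ [] := by
            intro hh; rw [hm, hh] at hlen; simp at hlen
          have hu : ('.' : Char) ∉ u := (msp_cons_cons _ u v r hm).1
          rw [scanEq u v pvMapA mapA_ok _ r hm hr, flatA,
            groupedEq u v hu pvGroups groups_dot groups_pw, ← byServiceB_eq]
          simp
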